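-- pv_equiv track=rewrite | github.com/yuxqiu/garden | 2025-06-30-attacks-on-rsa/attacks-on-rsa.py | strategy2
-- ===== SOURCE A (Python) =====
-- import math
--
-- def mod_pow(base, exp, mod):
--     return pow(base, exp, mod)
--
-- def strategy2(g, N, t, r, p, q):
--     for i in range(t-1, -1, -1):
--         exp = 2**i * r
--         g_k2 = mod_pow(g, exp, N)
--
--         factor = math.gcd(g_k2 - 1, N)
--         if 1 < factor < N:
--             return factor, True
--
--     return None, False
-- ===== SOURCE B (Python) =====
-- import math
--
-- def strategy2(g, N, t, r, p, q):
--     # Compute g^r mod N once, then obtain every g^(2^i * r) mod N by one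
--     # squaring each; scan the stored powers with i descending, as A does.
--     if t <= 0:
--         return None, False
--     powers = [pow(g, r, N)]
--     for _ in range(t - 1):
--         powers.append(powers[-1] * powers[-1] % N)
--     for x in reversed(powers):
--         factor = math.gcd(x - 1, N)
--         if 1 < factor < N:
--             return factor, True
--     return None, False
-- ===== Notes on version B (the rewrite author's own statement) =====
-- stated objective: alternative
-- what changed: Instead of a fresh modular exponentiation pow(g, 2**i * r, N) at every iteration, B computes pow(g, r, N) once, derives all t powers g^(2^i r) mod N by one modular squaring each, and scans them with i descending exactly as A does; this trades A's repeated big-exponent pow calls for an explicit stored squaring chain.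
import Mathlib
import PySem

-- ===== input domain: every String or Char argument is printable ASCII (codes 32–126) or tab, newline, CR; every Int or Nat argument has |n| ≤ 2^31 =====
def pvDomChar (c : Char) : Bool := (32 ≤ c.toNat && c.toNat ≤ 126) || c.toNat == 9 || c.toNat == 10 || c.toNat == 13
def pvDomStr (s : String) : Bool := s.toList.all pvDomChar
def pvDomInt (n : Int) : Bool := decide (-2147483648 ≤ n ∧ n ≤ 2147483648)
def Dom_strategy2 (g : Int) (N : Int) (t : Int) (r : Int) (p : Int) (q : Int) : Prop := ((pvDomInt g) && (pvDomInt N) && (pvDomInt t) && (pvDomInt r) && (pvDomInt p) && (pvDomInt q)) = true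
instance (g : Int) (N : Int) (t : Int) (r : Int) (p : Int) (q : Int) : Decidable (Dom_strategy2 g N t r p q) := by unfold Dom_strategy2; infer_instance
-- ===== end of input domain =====

-- B computes pow(g, r, N) once and derives each g^(2^i r) mod N by a single
-- modular squaring (a stored chain instead of A's per-iteration pow call),
-- then scans the chain descending exactly as A does.


-- ===== PORT A =====
-- Hand-written port of Python's built-in pow(b, e, m) for e ≥ 0 (binary
-- exponentiation with PySem.Int.mod, Python's floor mod, at each step); it is
-- proved equal to PySem.Int.mod (b ^ e) m below, i.e. exact for every m ≠ 0:
-- PySem.Int.powMod computes b ^ e as a full integer first, which is infeasible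
-- for the huge exponents 2^i * r this program builds.
def powModFast (b : Int) (m : Int) (e : Nat) : Int :=
  if e = 0 then PySem.Int.mod 1 m
  else
    let h := powModFast b m (e / 2)
    let s := PySem.Int.mod (h * h) m
    if e % 2 = 1 then PySem.Int.mod (s * b) m else s
termination_by e
decreasing_by omega

-- Extended Euclid on Nat: egcdN a b = (x, y) with x*a + y*b = gcd a b.
-- Used only to port pow(b, e, m) with e < 0, where Python inverts b mod m.
def egcdN (a : Nat) (b : Nat) : Int × Int :=
  if h : b = 0 then (1, 0)
  else
    let (x, y) := egcdN b (a % b)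
    (y, x - (a / b : Int) * y)
termination_by b
decreasing_by exact Nat.mod_lt _ (Nat.pos_of_ne_zero h)

-- A representative of the inverse class of b mod m (exact as a representative
-- whenever m ≠ 0 and gcd(b, m) = 1, which is where Python's pow accepts e < 0).
def modInvRep (b : Int) (m : Int) : Int :=
  (egcdN ((PySem.Int.mod b m.natAbs)).toNat m.natAbs).1

-- Port of Python's 3-argument built-in pow(b, e, m): exact whenever m ≠ 0 and
-- (0 ≤ e or gcd(b, m) = 1) — exactly the inputs Pre_strategy2 admits; elsewhere
-- Python raises ValueError and this total function returns an unclaimed value.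
def pyPow3 (b : Int) (e : Int) (m : Int) : Int :=
  if 0 ≤ e then powModFast b m e.toNat
  else powModFast (modInvRep b m) m (-e).toNat

-- A's helper mod_pow(base, exp, mod) = pow(base, exp, mod)
def mod_pow (base : Int) (exp : Int) (mod : Int) : Int := pyPow3 base exp mod

-- the body of A's 'for i in range(t-1, -1, -1)' with early return
-- (i ∈ range(t-1,-1,-1) is ≥ 0, so Python's 2**i is (2 : Int) ^ i.toNat)
def strategy2Loop (g : Int) (N : Int) (r : Int) : List Int → Option Int × Bool
  | [] => (none, false)
  | i :: rest =>
    let exp := (2 : Int) ^ i.toNat * r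
    let g_k2 := mod_pow g exp N
    let factor : Int := Int.gcd (g_k2 - 1) N
    if 1 < factor ∧ factor < N then (some factor, true)
    else strategy2Loop g N r rest

def strategy2 (g : Int) (N : Int) (t : Int) (r : Int) (p : Int) (q : Int) : Option Int × Bool :=
  strategy2Loop g N r (PySem.List.pyRange (t - 1) (-1) (-1))

-- ===== PORT B =====
-- powers = [pow(g, r, N)]; for _ in range(t-1): powers.append(powers[-1]**2 % N)
-- (built front-to-back carrying the running last element, x = powers[-1])
def buildPowers (N : Int) (x : Int) : Nat → List Int
  | 0 => [x]
  | n + 1 => x :: buildPowers N (PySem.Int.mod (x * x) N) n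

-- for x in reversed(powers): early-return scan
def scanRev (N : Int) : List Int → Option Int × Bool
  | [] => (none, false)
  | x :: rest =>
    let factor : Int := Int.gcd (x - 1) N
    if 1 < factor ∧ factor < N then (some factor, true)
    else scanRev N rest

def strategy2_alt (g : Int) (N : Int) (t : Int) (r : Int) (p : Int) (q : Int) : Option Int × Bool :=
  if t ≤ 0 then (none, false)
  else scanRev N (buildPowers N (pyPow3 g r N) (t - 1).toNat).reverse

-- ===== PRECONDITION & SPEC =====
-- Pre_ excludes exactly the inputs on which Python A raises: with t ≥ 1 it
-- calls pow(g, 2^i * r, N), which raises ValueError when N = 0, and also when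
-- r < 0 unless g is invertible mod N.  (B raises on exactly the same inputs.)
def Pre_strategy2 (g : Int) (N : Int) (t : Int) (r : Int) (p : Int) (q : Int) : Prop :=
  t ≤ 0 ∨ (N ≠ 0 ∧ (0 ≤ r ∨ Int.gcd g N = 1))
instance (g : Int) (N : Int) (t : Int) (r : Int) (p : Int) (q : Int) : Decidable (Pre_strategy2 g N t r p q) := by unfold Pre_strategy2; infer_instance

def pvWitness_strategy2 : Int × Int × Int × Int × Int × Int := (3, 15, 3, 2, 3, 5)

def Spec_strategy2 (g : Int) (N : Int) (t : Int) (r : Int) (p : Int) (q : Int) (out : Option Int × Bool) : Prop := out = strategy2_alt g N t r p q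
instance (g : Int) (N : Int) (t : Int) (r : Int) (p : Int) (q : Int) (out : Option Int × Bool) : Decidable (Spec_strategy2 g N t r p q out) := by unfold Spec_strategy2; infer_instance

-- ===== CLAIM (what is proved, stated in full; the proofs are below) =====
def Claim_equal_strategy2 : Prop := ∀ (g : Int) (N : Int) (t : Int) (r : Int) (p : Int) (q : Int), Dom_strategy2 g N t r p q → Pre_strategy2 g N t r p q → Spec_strategy2 g N t r p q (strategy2 g N t r p q)

-- ===== LEMMAS AND PROOFS =====

theorem powModFast_eq (b m : Int) (e : Nat) : powModFast b m e = PySem.Int.mod (b ^ e) m := by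
  induction e using Nat.strong_induction_on with
  | _ e ih =>
    rw [powModFast]
    by_cases h0 : e = 0
    · simp [h0]
    · have ih2 := ih (e / 2) (by omega)
      simp only [if_neg h0, ih2, PySem.Int.mod]
      have hsq : ((b ^ (e / 2)).fmod m * (b ^ (e / 2)).fmod m).fmod m
          = (b ^ (2 * (e / 2))).fmod m := by
        rw [← Int.mul_fmod, two_mul, pow_add]
      by_cases h1 : e % 2 = 1
      · simp only [if_pos h1]
        rw [hsq]
        have hmul : ((b ^ (2 * (e / 2))).fmod m * b).fmod m
            = (b ^ (2 * (e / 2)) * b).fmod m := by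
          rw [Int.mul_fmod (b ^ (2 * (e / 2))) b m,
              Int.mul_fmod ((b ^ (2 * (e / 2))).fmod m) b m, Int.fmod_fmod]
        rw [hmul, ← pow_succ]
        have he : 2 * (e / 2) + 1 = e := by omega
        rw [he]
      · simp only [if_neg h1]
        rw [hsq]
        have he : 2 * (e / 2) = e := by omega
        rw [he]

theorem pyPow3_sq (g : Int) (N : Int) (e : Int) :
    PySem.Int.mod (pyPow3 g e N * pyPow3 g e N) N = pyPow3 g (2 * e) N := by
  unfold pyPow3
  by_cases he : 0 ≤ e
  · rw [if_pos he, if_pos (by omega : (0:Int) ≤ 2 * e)]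
    simp only [powModFast_eq, PySem.Int.mod]
    rw [← Int.mul_fmod, ← pow_add]
    have h2 : (2 * e).toNat = e.toNat + e.toNat := by omega
    rw [h2]
  · rw [if_neg he, if_neg (by omega : ¬ (0:Int) ≤ 2 * e)]
    simp only [powModFast_eq, PySem.Int.mod]
    rw [← Int.mul_fmod, ← pow_add]
    have h2 : (-(2 * e)).toNat = (-e).toNat + (-e).toNat := by omega
    rw [h2]

theorem buildPowers_eq (g : Int) (N : Int) : ∀ (k : Nat) (e : Int),
    buildPowers N (pyPow3 g e N) k
      = (List.range (k + 1)).map (fun j => pyPow3 g (2 ^ j * e) N) := by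
  intro k
  induction k with
  | zero => intro e; simp [buildPowers]
  | succ n ih =>
    intro e
    rw [buildPowers, pyPow3_sq g N e, ih (2 * e)]
    conv_rhs => rw [List.range_succ_eq_map]
    simp only [List.map_cons, List.map_map]
    congr 1
    · norm_num
    · apply List.map_congr_left
      intro j _
      simp only [Function.comp]
      have hpow : (2:Int) ^ j * (2 * e) = 2 ^ j.succ * e := by
        rw [pow_succ]; ring
      rw [hpow]

theorem loop_eq (g : Int) (N : Int) (r : Int) : ∀ l : List Int,
    strategy2Loop g N r l
      = scanRev N (l.map (fun i => pyPow3 g ((2:Int) ^ i.toNat * r) N)) := by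
  intro l
  induction l with
  | nil => rfl
  | cons i rest ih =>
    simp only [strategy2Loop, scanRev, List.map_cons, mod_pow]
    rw [ih]

theorem final_lists (g : Int) (N : Int) (r : Int) (t : Int) (ht : ¬ t ≤ 0) :
    (PySem.List.pyRange (t - 1) (-1) (-1)).map (fun i => pyPow3 g ((2:Int) ^ i.toNat * r) N)
      = ((List.range ((t - 1).toNat + 1)).map (fun j => pyPow3 g ((2:Int) ^ j * r) N)).reverse := by
  rw [PySem.List.pyRange_neg_one, List.map_map]
  apply List.ext_getElem
  · simp
    omega
  · intro i h1 h2
    have hi : i < (t - 1).toNat + 1 := by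
      simpa using h2
    simp only [List.getElem_map, List.getElem_reverse, List.getElem_range, Function.comp,
      List.length_map, List.length_range]
    have hx : (t - 1 - (i : Int)).toNat = (t - 1).toNat + 1 - 1 - i := by omega
    rw [hx]

-- ===== VERDICT (by name: the statement is the Claim_ definition above) =====
theorem strategy2_spec : Claim_equal_strategy2 := by
  intro g N t r p q _ _
  unfold Spec_strategy2 strategy2 strategy2_alt
  by_cases ht : t ≤ 0
  · rw [PySem.List.pyRange_neg_one_eq_nil (by omega : t - 1 ≤ -1), if_pos ht]
    rfl
  · rw [if_neg ht, loop_eq, buildPowers_eq, final_lists g N r t ht]
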